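-- pv_equiv track=rewrite | github.com/Amyhds/codingtest | 프로그래머스/lv1/42840. 모의고사/모의고사.py | solution
-- ===== SOURCE A (Python) =====
-- def solution(answers):
--     count = [0 for _ in range(3)]
--     A = [1, 2, 3, 4, 5]
--     B = [2, 1, 2, 3, 2, 4, 2, 5]
--     C = [3, 3, 1, 1, 2, 2, 4, 4, 5, 5]
--     #A
--     for i in range(len(answers)):
--         if answers[i] == A[i % 5]:
--             count[0] += 1
--     #B
--         if answers[i] == B[i % 8]:
--             count[1] += 1
--     #C
--         if answers[i] == C[i % 10]:
--             count[2] += 1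
--     m = max(count)
--     answer = [i+1 for i, v in enumerate(count) if v==m]
--     return answer
-- ===== SOURCE B (Python) =====
-- def solution(answers):
--     # Histogram approach: one pass bucketing answers by (position mod 40, value),
--     # then each pattern is scored with 40 dict lookups (40 = lcm of the period lengths).
--     freq = {}
--     for i, a in enumerate(answers):
--         key = (i % 40, a)
--         freq[key] = freq.get(key, 0) + 1
--     patterns = [[1, 2, 3, 4, 5],
--                 [2, 1, 2, 3, 2, 4, 2, 5],
--                 [3, 3, 1, 1, 2, 2, 4, 4, 5, 5]]
--     scores = []
--     for pat in patterns:
--         ext = pat * (40 // len(pat))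
--         scores.append(sum(freq.get((r, v), 0) for r, v in enumerate(ext)))
--     m = max(scores)
--     return [i + 1 for i, v in enumerate(scores) if v == m]
-- ===== Notes on version B (the rewrite author's own statement) =====
-- stated objective: alternative
-- what changed: B builds a frequency dictionary keyed by (position mod 40, answer) in one bucketing pass and then scores each pattern with 40 dictionary lookups against the pattern unrolled to the common period 40, instead of A's per-element comparison loop mutating a 3-slot count list.
import Mathlib
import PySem

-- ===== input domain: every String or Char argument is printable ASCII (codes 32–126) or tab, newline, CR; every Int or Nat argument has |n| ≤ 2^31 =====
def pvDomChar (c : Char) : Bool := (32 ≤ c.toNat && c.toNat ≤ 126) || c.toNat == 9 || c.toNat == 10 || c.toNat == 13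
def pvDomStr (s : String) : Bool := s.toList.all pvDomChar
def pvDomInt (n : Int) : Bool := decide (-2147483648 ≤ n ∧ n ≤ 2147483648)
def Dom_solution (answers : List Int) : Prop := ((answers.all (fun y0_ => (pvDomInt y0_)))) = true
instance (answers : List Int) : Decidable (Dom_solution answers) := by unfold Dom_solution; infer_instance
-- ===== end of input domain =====

-- B replaces A's per-element comparison loop by a histogram: one bucketing pass keyed by
-- (position mod 40, answer), then each pattern is scored with 40 dictionary lookups
-- (40 = lcm of the pattern lengths); same O(n) cost (objective: alternative).

-- ===== PORT A =====
-- Python's `count` is a 3-element list mutated in place; it is ported as a triple.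
-- The loop `for i in range(len(answers))` reading `answers[i]` is ported as structural
-- recursion over `answers` carrying the index i (always in range, so `getD` is exact).
def solutionLoopA (answers : List Int) (i : Nat) (c : Int × Int × Int) : Int × Int × Int :=
  match answers with
  | [] => c
  | a :: rest =>
      let c0 := c.1 + (if a = ([1, 2, 3, 4, 5] : List Int).getD (i % 5) 0 then 1 else 0)
      let c1 := c.2.1 + (if a = ([2, 1, 2, 3, 2, 4, 2, 5] : List Int).getD (i % 8) 0 then 1 else 0)
      let c2 := c.2.2 + (if a = ([3, 3, 1, 1, 2, 2, 4, 4, 5, 5] : List Int).getD (i % 10) 0 then 1 else 0)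
      solutionLoopA rest (i + 1) (c0, c1, c2)

def solution (answers : List Int) : List Int :=
  let c := solutionLoopA answers 0 (0, 0, 0)
  let count : List Int := [c.1, c.2.1, c.2.2]
  let m := (PySem.List.max? count (fun v => v)).getD 0
  ((PySem.List.enumerate count 0).filter (fun iv => iv.2 = m)).map (fun iv => iv.1 + 1)

-- ===== PORT B =====
-- `for i, a in enumerate(answers): freq[(i%40,a)] = freq.get((i%40,a),0) + 1`,
-- ported as structural recursion carrying the Python int index i.
def buildFreq : List Int → Int → PySem.Dict (Int × Int) Int → PySem.Dict (Int × Int) Int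
  | [], _, d => d
  | a :: rest, i, d =>
      let k : Int × Int := (PySem.Int.mod i 40, a)
      buildFreq rest (i + 1) (d.insert k (d.getD k 0 + 1))

-- `pat * (40 // len(pat))`: the repetition count is nonnegative, so `.toNat` is exact.
def extPat (pat : List Int) : List Int :=
  (List.replicate (PySem.Int.floordiv 40 (pat.length : Int)).toNat pat).flatten

-- `sum(freq.get((r, v), 0) for r, v in enumerate(ext))`
def scorePat (freq : PySem.Dict (Int × Int) Int) (pat : List Int) : Int :=
  ((PySem.List.enumerate (extPat pat) 0).map (fun rv => freq.getD rv 0)).sum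

def solution_alt (answers : List Int) : List Int :=
  let freq := buildFreq answers 0 PySem.Dict.empty
  let patterns : List (List Int) :=
    [[1, 2, 3, 4, 5], [2, 1, 2, 3, 2, 4, 2, 5], [3, 3, 1, 1, 2, 2, 4, 4, 5, 5]]
  let scores := patterns.map (fun pat => scorePat freq pat)
  let m := (PySem.List.max? scores (fun v => v)).getD 0
  ((PySem.List.enumerate scores 0).filter (fun iv => iv.2 = m)).map (fun iv => iv.1 + 1)

-- ===== PRECONDITION & SPEC =====
def Spec_solution (answers : List Int) (out : List Int) : Prop := out = solution_alt answers
instance (answers : List Int) (out : List Int) : Decidable (Spec_solution answers out) := by unfold Spec_solution; infer_instance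

-- ===== CLAIM (what is proved, stated in full; the proofs are below) =====
def Claim_equal_solution : Prop := ∀ (answers : List Int), Dom_solution answers → Spec_solution answers (solution answers)

-- ===== LEMMAS AND PROOFS =====

-- Common characterisation: number of matches of `answers` against pattern `p`
-- read cyclically starting at offset r.
def cnt (p : List Int) (r : Nat) : List Int → Int
  | [] => 0
  | a :: rest => (if a = p.getD r 0 then 1 else 0) + cnt p ((r + 1) % p.length) rest

theorem loopA_eq_cnt (answers : List Int) :
    ∀ (i : Nat) (c : Int × Int × Int),
      solutionLoopA answers i c =
        (c.1 + cnt [1, 2, 3, 4, 5] (i % 5) answers,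
         c.2.1 + cnt [2, 1, 2, 3, 2, 4, 2, 5] (i % 8) answers,
         c.2.2 + cnt [3, 3, 1, 1, 2, 2, 4, 4, 5, 5] (i % 10) answers) := by
  induction answers with
  | nil => intro i c; simp [solutionLoopA, cnt]
  | cons a rest ih =>
      intro i c
      rw [solutionLoopA, ih]
      have h5 : (i + 1) % 5 = (i % 5 + 1) % 5 := by omega
      have h8 : (i + 1) % 8 = (i % 8 + 1) % 8 := by omega
      have h10 : (i + 1) % 10 = (i % 10 + 1) % 10 := by omega
      rw [h5, h8, h10]
      simp only [cnt]
      refine Prod.ext ?_ (Prod.ext ?_ ?_) <;> simp <;> ring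

-- Bumping one key changes the summed lookups by the key's multiplicity in the list.
theorem sum_map_getD_insert (d : PySem.Dict (Int × Int) Int) (k : Int × Int) :
    ∀ (l : List (Int × Int)),
      (l.map (fun rv => (d.insert k (d.getD k 0 + 1)).getD rv 0)).sum
        = (l.map (fun rv => d.getD rv 0)).sum + (l.count k : Int) := by
  intro l
  induction l with
  | nil => simp
  | cons rv t ih =>
      rw [List.map_cons, List.map_cons, List.sum_cons, List.sum_cons, ih,
        List.count_cons, PySem.Dict.getD_insert]
      by_cases h : rv = k
      · simp [h]; ring
      · simp [h]; ring

-- In `enumerate ext 0` each index occurs once, so the multiplicity of a key is 0 or 1.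
theorem count_enum_key (ext : List Int) (r : Nat) (hr : r < ext.length) (a : Int) :
    (PySem.List.enumerate ext 0).count ((r : Int), a)
      = if ext.getD r 0 = a then 1 else 0 := by
  have hnd : (PySem.List.enumerate ext (0 : Int)).Nodup :=
    (PySem.List.pairwise_lt_enumerate ext 0).imp
      (fun {p q} hlt he => absurd (he ▸ hlt) (lt_irrefl _))
  have hget : ext.getD r 0 = ext[r] := List.getD_eq_getElem ext 0 hr
  by_cases h : ext.getD r 0 = a
  · have hmem : ((r : Int), a) ∈ PySem.List.enumerate ext (0 : Int) := by
      rw [PySem.List.mem_enumerate_iff]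
      exact ⟨r, hr, by rw [← h, hget]; simp⟩
    rw [List.count_eq_one_of_mem hnd hmem, if_pos h]
  · have hmem : ((r : Int), a) ∉ PySem.List.enumerate ext (0 : Int) := by
      rw [PySem.List.mem_enumerate_iff]
      rintro ⟨k, hk, heq⟩
      have hk' : k = r := by
        have := congrArg Prod.fst heq
        simp at this
        omega
      subst hk'
      exact h (by rw [hget]; exact (congrArg Prod.snd heq).symm)
  -- not a member: count is zero
    rw [List.count_eq_zero_of_not_mem hmem, if_neg h]

-- Lift the finite periodicity check (r < 40) to all offsets.
theorem hext_of_forall40 (p ext : List Int) (hdvd : p.length ∣ 40)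
    (h : ∀ r < 40, ext.getD r 0 = p.getD (r % p.length) 0) :
    ∀ n : Nat, ext.getD (n % 40) 0 = p.getD (n % p.length) 0 := by
  intro n
  rw [h _ (Nat.mod_lt _ (by norm_num)), Nat.mod_mod_of_dvd n hdvd]

-- Main invariant: scoring the histogram built from `answers` starting at index n
-- adds exactly the cyclic match count of `answers` against p from offset n.
theorem build_score (p ext : List Int) (hlen : ext.length = 40)
    (hext : ∀ n : Nat, ext.getD (n % 40) 0 = p.getD (n % p.length) 0)
    (answers : List Int) :
    ∀ (n : Nat) (d : PySem.Dict (Int × Int) Int),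
      ((PySem.List.enumerate ext 0).map
          (fun rv => (buildFreq answers (n : Int) d).getD rv 0)).sum
        = ((PySem.List.enumerate ext 0).map (fun rv => d.getD rv 0)).sum
            + cnt p (n % p.length) answers := by
  induction answers with
  | nil => intro n d; simp [buildFreq, cnt]
  | cons a rest ih =>
      intro n d
      have hcast : (n : Int) + 1 = ((n + 1 : Nat) : Int) := by push_cast; ring
      rw [show buildFreq (a :: rest) (n : Int) d
            = buildFreq rest ((n + 1 : Nat) : Int)
                (d.insert (PySem.Int.mod (n : Int) 40, a)
                  (d.getD (PySem.Int.mod (n : Int) 40, a) 0 + 1)) by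
            rw [buildFreq, hcast]]
      rw [ih]
      have hmod : PySem.Int.mod (n : Int) 40 = ((n % 40 : Nat) : Int) :=
        PySem.Int.mod_natCast n 40
      rw [hmod, sum_map_getD_insert,
        count_enum_key ext (n % 40) (by omega) a, hext n]
      have hstep : (n + 1) % p.length = (n % p.length + 1) % p.length := by
        conv_lhs => rw [Nat.add_mod]
        conv_rhs => rw [Nat.add_mod, Nat.mod_mod_of_dvd _ dvd_rfl]
      simp only [cnt, ← hstep]
      by_cases hv : a = p.getD (n % p.length) 0
      · simp [hv]; ring
      · have hv' : ¬ p.getD (n % p.length) 0 = a := fun h => hv h.symm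
        simp only [List.getD_eq_getElem?_getD] at hv hv'
        simp [if_neg hv', if_neg hv]

-- score of the empty histogram is 0
theorem score_empty (ext : List Int) :
    ((PySem.List.enumerate ext 0).map
        (fun rv => (PySem.Dict.empty (κ := Int × Int) (ν := Int)).getD rv 0)).sum = 0 := by
  simp [PySem.Dict.getD_empty]

-- ===== VERDICT (by name: the statement is the Claim_ definition above) =====
theorem score_eq_cnt (pat : List Int) (hlen : (extPat pat).length = 40)
    (hdvd : pat.length ∣ 40)
    (h40 : ∀ r < 40, (extPat pat).getD r 0 = pat.getD (r % pat.length) 0)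
    (answers : List Int) :
    scorePat (buildFreq answers 0 PySem.Dict.empty) pat = cnt pat 0 answers := by
  unfold scorePat
  have h := build_score pat (extPat pat) hlen (hext_of_forall40 pat (extPat pat) hdvd h40)
    answers 0 PySem.Dict.empty
  simp only [Nat.cast_zero] at h
  rw [h, score_empty, Nat.zero_mod, zero_add]

theorem solution_spec : Claim_equal_solution := by
  intro answers _
  show solution answers = solution_alt answers
  unfold solution solution_alt
  rw [loopA_eq_cnt]
  simp only [List.map]
  have e1 := score_eq_cnt [1, 2, 3, 4, 5] (by decide) (by decide) (by decide) answers
  have e2 := score_eq_cnt [2, 1, 2, 3, 2, 4, 2, 5] (by decide) (by decide) (by decide) answers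
  have e3 := score_eq_cnt [3, 3, 1, 1, 2, 2, 4, 4, 5, 5] (by decide) (by decide) (by decide) answers
  have hs : [(0:Int) + cnt [1, 2, 3, 4, 5] (0 % 5) answers,
             0 + cnt [2, 1, 2, 3, 2, 4, 2, 5] (0 % 8) answers,
             0 + cnt [3, 3, 1, 1, 2, 2, 4, 4, 5, 5] (0 % 10) answers]
           = [scorePat (buildFreq answers 0 PySem.Dict.empty) [1, 2, 3, 4, 5],
              scorePat (buildFreq answers 0 PySem.Dict.empty) [2, 1, 2, 3, 2, 4, 2, 5],
              scorePat (buildFreq answers 0 PySem.Dict.empty) [3, 3, 1, 1, 2, 2, 4, 4, 5, 5]] := by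
    rw [e1, e2, e3]; norm_num
  exact congrArg (fun scores =>
    ((PySem.List.enumerate scores 0).filter
        (fun iv => iv.2 = (PySem.List.max? scores (fun v => v)).getD 0)).map
      (fun iv => iv.1 + 1)) hs
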